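-- pv_equiv track=rewrite | github.com/the-omega-institute/automath | theory/2026_golden_ratio_driven_scan_projection_generation_recursive_emergence/scripts/exp_foldbin6_two_point_fiber_direction_spectrum.py | _K_of_m
-- ===== SOURCE A (Python) =====
-- def _K_of_m(m: int) -> int:
--     """Return K(m) s.t. F_{K+1} <= 2^m-1 < F_{K+2} (F_1=F_2=1)."""
--     target = (1 << m) - 1
--     f1, f2 = 1, 1
--     idx = 2
--     while f2 <= target:
--         f1, f2 = f2, f1 + f2
--         idx += 1
--     return idx - 2
-- ===== SOURCE B (Python) =====
-- def _fib_pair(n: int) -> tuple: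
--     """Fast doubling: return (F_n, F_{n+1}) with F_0 = 0, F_1 = 1."""
--     if n == 0:
--         return (0, 1)
--     a, b = _fib_pair(n >> 1)
--     c = a * (2 * b - a)
--     d = a * a + b * b
--     if n & 1:
--         return (d, c + d)
--     return (c, d)
--
--
-- def _fib(n: int) -> int:
--     return _fib_pair(n)[0]
--
--
-- def _K_of_m(m: int) -> int:
--     """Return K(m) s.t. F_{K+1} <= 2^m-1 < F_{K+2} (F_1=F_2=1)."""
--     target = (1 << m) - 1
--     if target < 1:
--         return 0
--     hi = 2
--     while _fib(hi) <= target: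
--         hi *= 2
--     lo = hi // 2
--     while hi - lo > 1:
--         mid = (lo + hi) // 2
--         if _fib(mid) <= target:
--             lo = mid
--         else:
--             hi = mid
--     return hi - 2
-- ===== Notes on version B (the rewrite author's own statement) =====
-- stated objective: faster
-- what changed: Replaces the linear additive Fibonacci loop by fast-doubling Fibonacci plus exponential-then-binary search on the index for the first F_i > 2^m-1.
import Mathlib
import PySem

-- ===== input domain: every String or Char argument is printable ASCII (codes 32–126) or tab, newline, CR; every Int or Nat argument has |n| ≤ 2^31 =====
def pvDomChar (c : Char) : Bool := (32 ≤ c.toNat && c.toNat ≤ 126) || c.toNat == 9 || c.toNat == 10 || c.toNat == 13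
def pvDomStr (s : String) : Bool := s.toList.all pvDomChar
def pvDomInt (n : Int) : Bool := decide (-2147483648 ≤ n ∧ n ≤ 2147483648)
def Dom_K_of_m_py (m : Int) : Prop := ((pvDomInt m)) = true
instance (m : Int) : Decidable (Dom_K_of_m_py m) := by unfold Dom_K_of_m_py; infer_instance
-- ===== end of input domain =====

-- B replaces A's linear Fibonacci loop by fast-doubling Fibonacci with exponential-then-binary
-- search on the index (objective: faster; matching return values for every m ≥ 0).

-- ===== PORT A =====
-- A's while loop: state (f1, f2, idx); the invariant hypotheses 1 ≤ f1 ≤ f2 (true at every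
-- call site) only serve termination, the computation is exactly A's.
def pvALoop (target f1 f2 idx : Int) (h1 : 1 ≤ f1) (h2 : f1 ≤ f2) : Int :=
  if h : f2 ≤ target then
    pvALoop target f2 (f1 + f2) (idx + 1) (le_trans h1 h2) (by omega)
  else
    idx - 2
termination_by (target + 1 - f2).toNat
decreasing_by omega

-- `(1 <<< m) - 1` ported as `2 ^ m.toNat - 1`: identical for the m ≥ 0 admitted by Pre_.
def K_of_m_py (m : Int) : Int :=
  pvALoop (2 ^ m.toNat - 1) 1 1 2 (le_refl 1) (le_refl 1)

-- ===== PORT B =====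
-- fast doubling: (F_n, F_{n+1}) with F_0 = 0, F_1 = 1  (Source B: _fib_pair)
def pvFibPair (n : Nat) : Int × Int :=
  if n = 0 then (0, 1)
  else
    let p := pvFibPair (n / 2)
    let a := p.1
    let b := p.2
    let c := a * (2 * b - a)
    let d := a * a + b * b
    if n % 2 = 1 then (d, c + d) else (c, d)
termination_by n
decreasing_by omega

-- Source B: _fib
def pvFib (n : Nat) : Int := (pvFibPair n).1

-- The two lemmas below are cited by the ports' termination proofs, so they stay above the ports.
theorem pvFibPair_eq (n : Nat) :
    pvFibPair n = ((Nat.fib n : Int), (Nat.fib (n + 1) : Int)) := by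
  rw [pvFibPair]
  by_cases h0 : n = 0
  · simp [h0]
  · have ih := pvFibPair_eq (n / 2)
    simp only [h0, if_false, ih]
    have hle : Nat.fib (n / 2) ≤ 2 * Nat.fib (n / 2 + 1) := by
      have := Nat.fib_le_fib_succ (n := n / 2); omega
    by_cases hp : n % 2 = 1
    · have hn : n = 2 * (n / 2) + 1 := by omega
      have e1 : Nat.fib n = Nat.fib (n / 2 + 1) ^ 2 + Nat.fib (n / 2) ^ 2 := by
        conv_lhs => rw [hn]
        exact Nat.fib_two_mul_add_one (n / 2)
      have e2 : Nat.fib (n + 1) = Nat.fib (2 * (n / 2)) + Nat.fib n := by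
        have hn1 : n + 1 = 2 * (n / 2) + 2 := by omega
        conv_lhs => rw [hn1, Nat.fib_add_two]
        rw [← hn]
      have e3 : Nat.fib (2 * (n / 2)) = Nat.fib (n / 2) * (2 * Nat.fib (n / 2 + 1) - Nat.fib (n / 2)) :=
        Nat.fib_two_mul (n / 2)
      simp only [hp, if_true]
      refine Prod.ext ?_ ?_
      · show _ = ((Nat.fib n : ℕ) : ℤ)
        rw [e1]; push_cast; ring
      · show _ = ((Nat.fib (n + 1) : ℕ) : ℤ)
        rw [e2, e3, e1, Nat.cast_add, Nat.cast_mul, Nat.cast_sub hle]; push_cast; ring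
    · have hn : n = 2 * (n / 2) := by omega
      have e1 : Nat.fib n = Nat.fib (n / 2) * (2 * Nat.fib (n / 2 + 1) - Nat.fib (n / 2)) := by
        conv_lhs => rw [hn]
        exact Nat.fib_two_mul (n / 2)
      have e2 : Nat.fib (n + 1) = Nat.fib (n / 2 + 1) ^ 2 + Nat.fib (n / 2) ^ 2 := by
        have hn1 : n + 1 = 2 * (n / 2) + 1 := by omega
        conv_lhs => rw [hn1]
        exact Nat.fib_two_mul_add_one (n / 2)
      simp only [hp, if_false]
      refine Prod.ext ?_ ?_
      · show _ = ((Nat.fib n : ℕ) : ℤ)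
        rw [e1, Nat.cast_mul, Nat.cast_sub hle]; push_cast; ring
      · show _ = ((Nat.fib (n + 1) : ℕ) : ℤ)
        rw [e2]; push_cast; ring
termination_by n
decreasing_by omega

theorem le_fib_add_two (n : Nat) : n ≤ Nat.fib (n + 2) := by
  induction n with
  | zero => decide
  | succ k ih =>
      have h1 : 0 < Nat.fib (k + 1) := Nat.fib_pos.mpr (by omega)
      have e : Nat.fib (k + 3) = Nat.fib (k + 1) + Nat.fib (k + 2) := Nat.fib_add_two (n := k + 1)
      show k + 1 ≤ Nat.fib (k + 3)
      omega

theorem pvFib_ge (n : Nat) : (n : Int) - 2 ≤ pvFib n := by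
  unfold pvFib
  rw [pvFibPair_eq]
  rcases Nat.lt_or_ge n 2 with h | h
  · have : 0 ≤ Nat.fib n := Nat.zero_le _
    push_cast; omega
  · have := le_fib_add_two (n - 2)
    have h2 : n - 2 + 2 = n := by omega
    rw [h2] at this
    push_cast; omega

-- Source B: the exponential-search loop `while _fib(hi) <= target: hi *= 2`
def pvELoop (target : Int) (hi : Nat) (h : 2 ≤ hi) : Nat :=
  if hc : pvFib hi ≤ target then pvELoop target (2 * hi) (by omega) else hi
termination_by (target + 3 - (hi : Int)).toNat
decreasing_by
  have := pvFib_ge hi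
  omega

-- Source B: the binary-search loop on (lo, hi]
def pvBLoop (target : Int) (lo hi : Nat) : Nat :=
  if hi ≤ lo + 1 then hi
  else
    let mid := (lo + hi) / 2
    if pvFib mid ≤ target then pvBLoop target mid hi else pvBLoop target lo mid
termination_by hi - lo
decreasing_by all_goals omega

def K_of_m_py_alt (m : Int) : Int :=
  let target := 2 ^ m.toNat - 1
  if target < 1 then 0
  else
    let hi := pvELoop target 2 (le_refl 2)
    (pvBLoop target (hi / 2) hi : Int) - 2

-- ===== PRECONDITION & SPEC =====
-- Pre_: m ≥ 0; for negative m the Python `1 << m` raises ValueError in both A and B.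
def Pre_K_of_m_py (m : Int) : Prop := 0 ≤ m
instance (m : Int) : Decidable (Pre_K_of_m_py m) := by unfold Pre_K_of_m_py; infer_instance
def pvWitness_K_of_m_py : Int := 5

def Spec_K_of_m_py (m : Int) (out : Int) : Prop := out = K_of_m_py_alt m
instance (m : Int) (out : Int) : Decidable (Spec_K_of_m_py m out) := by unfold Spec_K_of_m_py; infer_instance

-- ===== CLAIM (what is proved, stated in full; the proofs are below) =====
def Claim_equal_K_of_m_py : Prop := ∀ (m : Int), Dom_K_of_m_py m → Pre_K_of_m_py m → Spec_K_of_m_py m (K_of_m_py m)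

-- ===== LEMMAS AND PROOFS =====

-- Both programs return i - 2 for the unique index i with this property:
-- i ≥ 2, F_i > target, and i is the least such index ≥ 2.
def pvGood (target : Int) (i : Nat) : Prop :=
  2 ≤ i ∧ target < (Nat.fib i : Int) ∧ (i = 2 ∨ (Nat.fib (i - 1) : Int) ≤ target)

theorem pvGood_unique {target : Int} {i j : Nat} (hi : pvGood target i) (hj : pvGood target j) :
    i = j := by
  rcases hi with ⟨hi2, hif, hib⟩
  rcases hj with ⟨hj2, hjf, hjb⟩
  rcases lt_trichotomy i j with h | h | h
  · exfalso
    rcases hjb with rfl | hjb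
    · omega
    · have : Nat.fib i ≤ Nat.fib (j - 1) := Nat.fib_mono (by omega)
      have : ((Nat.fib i : Nat) : Int) ≤ ((Nat.fib (j - 1) : Nat) : Int) := by exact_mod_cast this
      omega
  · exact h
  · exfalso
    rcases hib with rfl | hib
    · omega
    · have : Nat.fib j ≤ Nat.fib (i - 1) := Nat.fib_mono (by omega)
      have : ((Nat.fib j : Nat) : Int) ≤ ((Nat.fib (i - 1) : Nat) : Int) := by exact_mod_cast this
      omega

theorem pvALoop_good (target : Int) (k : Nat) (f1 f2 idx : Int)
    (e1 : f1 = (Nat.fib (k - 1) : Int)) (e2 : f2 = (Nat.fib k : Int)) (e3 : idx = (k : Int))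
    (hk : 2 ≤ k) (hb : k = 2 ∨ (Nat.fib (k - 1) : Int) ≤ target)
    (h1 : 1 ≤ f1) (h2 : f1 ≤ f2) :
    ∃ i : Nat, pvGood target i ∧ pvALoop target f1 f2 idx h1 h2 = (i : Int) - 2 := by
  rw [pvALoop]
  split
  · rename_i hcond
    have hfib : f1 + f2 = (Nat.fib (k + 1) : Int) := by
      have hk1 : k - 1 + 2 = k + 1 := by omega
      have hk2 : k - 1 + 1 = k := by omega
      have hstep : Nat.fib (k + 1) = Nat.fib (k - 1) + Nat.fib k := by
        conv_lhs => rw [← hk1]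
        rw [Nat.fib_add_two, hk2]
      rw [e1, e2, hstep]; push_cast; ring
    have hb' : (Nat.fib (k + 1 - 1) : Int) ≤ target := by
      rw [show k + 1 - 1 = k by omega, ← e2]; exact hcond
    have ih := pvALoop_good target (k + 1) f2 (f1 + f2) (idx + 1)
      (by rw [show k + 1 - 1 = k by omega]; exact e2) hfib
      (by rw [e3]; push_cast; ring) (by omega) (Or.inr hb')
      (by omega) (by omega)
    exact ih
  · rename_i hcond
    refine ⟨k, ⟨hk, ?_, hb⟩, by omega⟩
    rw [← e2]; omega
termination_by (target + 1 - f2).toNat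
decreasing_by
  rename_i hcond
  omega

theorem pvELoop_good (target : Int) (hi : Nat) (h : 2 ≤ hi)
    (hb : hi = 2 ∨ (Nat.fib (hi / 2) : Int) ≤ target) :
    2 ≤ pvELoop target hi h ∧ target < (Nat.fib (pvELoop target hi h) : Int) ∧
      (pvELoop target hi h = 2 ∨ (Nat.fib (pvELoop target hi h / 2) : Int) ≤ target) := by
  rw [pvELoop]
  split
  · rename_i hc
    have hfc : (Nat.fib hi : Int) ≤ target := by
      have : pvFib hi = (Nat.fib hi : Int) := by unfold pvFib; rw [pvFibPair_eq]
      omega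
    exact pvELoop_good target (2 * hi) (by omega) (Or.inr (by rw [show 2 * hi / 2 = hi by omega]; exact hfc))
  · rename_i hc
    have : (Nat.fib hi : Int) = pvFib hi := by unfold pvFib; rw [pvFibPair_eq]
    exact ⟨h, by omega, hb⟩
termination_by (target + 3 - (hi : Int)).toNat
decreasing_by
  have := pvFib_ge hi
  omega

theorem pvBLoop_good (target : Int) (lo hi : Nat)
    (hlo : 1 ≤ lo) (hlh : lo < hi)
    (hfl : (Nat.fib lo : Int) ≤ target) (hfh : target < (Nat.fib hi : Int)) :
    pvGood target (pvBLoop target lo hi) := by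
  rw [pvBLoop]
  split
  · rename_i hc
    have hhi : hi = lo + 1 := by omega
    refine ⟨by omega, hfh, Or.inr ?_⟩
    rw [show hi - 1 = lo by omega]; exact hfl
  · rename_i hc
    have hfm : pvFib ((lo + hi) / 2) = (Nat.fib ((lo + hi) / 2) : Int) := by
      unfold pvFib; rw [pvFibPair_eq]
    show pvGood target
      (if pvFib ((lo + hi) / 2) ≤ target then pvBLoop target ((lo + hi) / 2) hi
       else pvBLoop target lo ((lo + hi) / 2))
    split
    · rename_i hm
      exact pvBLoop_good target ((lo + hi) / 2) hi (by omega) (by omega) (by omega) hfh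
    · rename_i hm
      exact pvBLoop_good target lo ((lo + hi) / 2) hlo (by omega) hfl (by omega)
termination_by hi - lo
decreasing_by all_goals omega

-- ===== VERDICT (by name: the statement is the Claim_ definition above) =====
theorem K_of_m_py_spec : Claim_equal_K_of_m_py := by
  intro m _ _
  unfold Spec_K_of_m_py K_of_m_py K_of_m_py_alt
  show pvALoop (2 ^ m.toNat - 1) 1 1 2 (le_refl 1) (le_refl 1) =
    if 2 ^ m.toNat - 1 < 1 then 0
    else (pvBLoop (2 ^ m.toNat - 1) (pvELoop (2 ^ m.toNat - 1) 2 (le_refl 2) / 2)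
      (pvELoop (2 ^ m.toNat - 1) 2 (le_refl 2)) : Int) - 2
  set t : Int := 2 ^ m.toNat - 1 with ht
  have hf1 : ((Nat.fib 1 : Nat) : Int) = 1 := by decide
  have hf2 : ((Nat.fib 2 : Nat) : Int) = 1 := by decide
  obtain ⟨iA, hA, eA⟩ :=
    pvALoop_good t 2 1 1 2 (by rw [show (2 : Nat) - 1 = 1 by omega, hf1]) (by rw [hf2])
      (by norm_num) (le_refl 2) (Or.inl rfl) (le_refl 1) (le_refl 1)
  rw [eA]
  by_cases h0 : t < 1
  · simp only [h0, if_true]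
    have h2 : pvGood t 2 := ⟨le_refl 2, by rw [hf2]; omega, Or.inl rfl⟩
    have := pvGood_unique hA h2
    omega
  · simp only [h0, if_false]
    obtain ⟨hH2, hHf, hHb⟩ := pvELoop_good t 2 (le_refl 2) (Or.inl rfl)
    set H := pvELoop t 2 (le_refl 2) with hH
    have hHne : ¬ H = 2 := by
      intro he
      rw [he, hf2] at hHf
      omega
    have hHb' : (Nat.fib (H / 2) : Int) ≤ t := hHb.resolve_left hHne
    have hB := pvBLoop_good t (H / 2) H (by omega) (by omega) hHb' hHf
    have := pvGood_unique hA hB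
    omega
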